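-- pv_equiv track=rewrite | github.com/ToDa-Inc/silas-content-system | backend/services/similarity_discovery_keywords.py | _filter_blacklist
-- ===== SOURCE A (Python) =====
-- from typing import Any, Dict, List, Optional, Set, Tuple
--
-- def _filter_blacklist(phrases: List[str], blacklist: Dict[str, Any]) -> List[str]:
--     if not blacklist:
--         return phrases
--     banned_kw = [str(x).lower().strip() for x in (blacklist.get("keywords") or []) if x]
--     out: List[str] = []
--     for p in phrases:
--         pl = p.lower()
--         if any(b and b in pl for b in banned_kw):
--             continue
--         out.append(p)
--     return out
-- ===== SOURCE B (Python) =====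
-- def _filter_blacklist(phrases, blacklist):
--     # keyword-major: successively filter the phrase list once per banned keyword
--     result = phrases
--     for x in blacklist.get("keywords") or []:
--         kw = str(x).lower().strip()
--         if kw:
--             result = [p for p in result if kw not in p.lower()]
--     return result
-- ===== Notes on version B (the rewrite author's own statement) =====
-- stated objective: alternative
-- what changed: B inverts the loop nesting: instead of scanning all keywords per phrase with any(), it iterates over the keywords once and successively filters the phrase list per keyword, with no early-return for an empty blacklist and no pre-normalised keyword list.
import Mathlib
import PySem

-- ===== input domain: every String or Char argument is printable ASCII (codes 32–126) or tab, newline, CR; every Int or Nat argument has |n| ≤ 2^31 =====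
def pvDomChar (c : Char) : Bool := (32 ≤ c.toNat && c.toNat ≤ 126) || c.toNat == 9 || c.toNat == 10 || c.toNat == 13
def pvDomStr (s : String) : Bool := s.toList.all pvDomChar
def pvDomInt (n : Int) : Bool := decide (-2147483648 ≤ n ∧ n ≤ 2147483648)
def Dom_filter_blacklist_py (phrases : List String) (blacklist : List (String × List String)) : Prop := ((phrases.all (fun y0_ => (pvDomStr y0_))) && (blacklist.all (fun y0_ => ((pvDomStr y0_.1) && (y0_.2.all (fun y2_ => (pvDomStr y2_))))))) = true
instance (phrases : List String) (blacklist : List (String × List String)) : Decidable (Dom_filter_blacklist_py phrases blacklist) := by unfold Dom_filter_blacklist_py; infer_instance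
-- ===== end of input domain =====

-- B inverts the loop nesting: it iterates over the banned keywords and successively filters the
-- phrase list once per keyword, instead of testing every keyword inside a per-phrase loop (alternative; not faster).


-- ===== PORT A =====
def filter_blacklist_py (phrases : List String) (blacklist : List (String × List String)) : List String :=
  if blacklist = [] then phrases
  else
    let banned_kw : List String :=
      ((((PySem.Dict.mk blacklist).get? "keywords").getD []).filter (fun x => x != "")).map
        (fun x => PySem.Str.strip (PySem.Str.lower x))
    phrases.foldl
      (fun out p =>
        let pl := PySem.Str.lower p
        if banned_kw.any (fun b => b != "" && PySem.Str.isIn b pl) then out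
        else out ++ [p])
      []

-- ===== PORT B =====
def filter_blacklist_py_alt (phrases : List String) (blacklist : List (String × List String)) : List String :=
  (((PySem.Dict.mk blacklist).get? "keywords").getD []).foldl
    (fun result x =>
      let kw := PySem.Str.strip (PySem.Str.lower x)
      if kw != "" then result.filter (fun p => !(PySem.Str.isIn kw (PySem.Str.lower p)))
      else result)
    phrases

-- ===== PRECONDITION & SPEC =====
def Spec_filter_blacklist_py (phrases : List String) (blacklist : List (String × List String)) (out : List String) : Prop := out = filter_blacklist_py_alt phrases blacklist
instance (phrases : List String) (blacklist : List (String × List String)) (out : List String) : Decidable (Spec_filter_blacklist_py phrases blacklist out) := by unfold Spec_filter_blacklist_py; infer_instance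

-- ===== CLAIM (what is proved, stated in full; the proofs are below) =====
def Claim_equal_filter_blacklist_py : Prop := ∀ (phrases : List String) (blacklist : List (String × List String)), Dom_filter_blacklist_py phrases blacklist → Spec_filter_blacklist_py phrases blacklist (filter_blacklist_py phrases blacklist)

-- ===== LEMMAS AND PROOFS =====

-- the keyword normalisation both programs apply: str(x).lower().strip()
def pvNorm (x : String) : String := PySem.Str.strip (PySem.Str.lower x)

-- B's keyword-major foldl computes one filter with the combined "no keyword matches" predicate
theorem alt_foldl_eq_filter (kws ps : List String) :
    kws.foldl
      (fun result x =>
        let kw := PySem.Str.strip (PySem.Str.lower x)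
        if kw != "" then result.filter (fun p => !(PySem.Str.isIn kw (PySem.Str.lower p)))
        else result)
      ps
    = ps.filter (fun p => !(kws.any (fun x => pvNorm x != "" && PySem.Str.isIn (pvNorm x) (PySem.Str.lower p)))) := by
  induction kws generalizing ps with
  | nil => simp
  | cons k kws ih =>
    rw [List.foldl_cons, ih]
    by_cases h : pvNorm k = ""
    · rw [if_neg (by simp [pvNorm] at h; simp [h])]
      refine List.filter_congr ?_
      intro p _
      simp [List.any_cons, h]
    · rw [if_pos (by simp [pvNorm] at h ⊢; exact h)]
      rw [List.filter_filter]
      refine List.filter_congr ?_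
      intro p _
      simp only [List.any_cons, Bool.not_or]
      simp only [pvNorm] at h ⊢
      have hk : (PySem.Str.strip (PySem.Str.lower k) != "") = true := by simp [h]
      simp [hk, Bool.and_comm]

-- A's match test over the pre-filtered, pre-normalised keyword list equals B's per-keyword test
theorem banned_any (kws : List String) (pl : String) :
    ((kws.filter (fun x => x != "")).map (fun x => PySem.Str.strip (PySem.Str.lower x))).any
      (fun b => b != "" && PySem.Str.isIn b pl)
    = kws.any (fun x => pvNorm x != "" && PySem.Str.isIn (pvNorm x) pl) := by
  induction kws with
  | nil => simp
  | cons a l ih =>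
    by_cases ha : a = ""
    · subst ha
      rw [List.filter_cons_of_neg (by decide), ih, List.any_cons]
      have h0 : (pvNorm "" != "") = false := by decide
      rw [h0, Bool.false_and, Bool.false_or]
    · rw [List.filter_cons_of_pos (by simp [ha]), List.map_cons, List.any_cons, List.any_cons, ih]
      unfold pvNorm
      rfl

-- ===== VERDICT (by name: the statement is the Claim_ definition above) =====
theorem filter_blacklist_py_spec : Claim_equal_filter_blacklist_py := by
  intro ps bl _
  unfold Spec_filter_blacklist_py filter_blacklist_py filter_blacklist_py_alt
  rw [alt_foldl_eq_filter]
  by_cases hb : bl = []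
  · subst hb
    simp [PySem.Dict.get?]
  · rw [if_neg hb]
    dsimp only
    have heq := PySem.List.foldl_congr_mem ps
      (fun (out : List String) p =>
        if (((((PySem.Dict.mk bl).get? "keywords").getD []).filter (fun x => x != "")).map
              (fun x => PySem.Str.strip (PySem.Str.lower x))).any
              (fun b => b != "" && PySem.Str.isIn b (PySem.Str.lower p))
        then out else out ++ [p])
      (fun (out : List String) p =>
        if !((((((PySem.Dict.mk bl).get? "keywords").getD []).filter (fun x => x != "")).map
              (fun x => PySem.Str.strip (PySem.Str.lower x))).any
              (fun b => b != "" && PySem.Str.isIn b (PySem.Str.lower p)))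
        then out ++ [p] else out)
      []
      (by intro out p _
          dsimp only
          by_cases hc : (((((PySem.Dict.mk bl).get? "keywords").getD []).filter (fun x => x != "")).map
              (fun x => PySem.Str.strip (PySem.Str.lower x))).any
              (fun b => b != "" && PySem.Str.isIn b (PySem.Str.lower p)) = true
          · rw [if_pos hc, if_neg (by rw [hc]; decide)]
          · rw [Bool.not_eq_true] at hc
            rw [if_neg (by rw [hc]; decide), if_pos (by rw [hc]; decide)])
    rw [heq]
    rw [PySem.List.foldl_append_if_eq_filter]
    rw [List.nil_append]
    refine List.filter_congr ?_
    intro p _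
    congr 1
    exact banned_any _ _
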